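-- pv_equiv track=rewrite | github.com/eddiemo/ATDS | Rings&Ideals.py | buildsubring
-- ===== SOURCE A (Python) =====
-- def findnull(new, m):
--     for val in new:
--         check = True
--         for elem in new:
--             if (elem + val) % m != elem:
--                 check = False
--                 break
--         if check:
--             return val
--     return -1
--
-- def findone(new, m):
--     for val in new:
--         check = True
--         for elem in new:
--             if (elem * val) % m != elem:
--                 check = False
--                 break
--         if check:
--             return val
--     return -1
--
-- def buildsubring(init, m):
--     oldset = set()
--     newset = set()
--     for i in range(len(init)):
--         oldset.add(init[i])
--     while True:
--         while len(oldset) != len(newset):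
--             newset.update(oldset)
--             for val1 in newset:
--                 for val2 in newset:
--                     oldset.add((val1 + val2) % m)
--                     oldset.add((val1 * val2) % m)
--         check = True
--         null = findnull(newset, m)
--         one = findone(newset, m)
--         if null == -1:
--             null = 0
--         if one == -1:
--             one = 1
--         if not null in newset:
--             newset.add(null)
--             check = False
--         if not one in newset:
--             newset.add(one)
--             check = False
--
--         if not check:
--             continue
--
--         helpset = set()
--         helpset.update(newset)
--         for elem in newset:
--             if not ((m + null - elem) % m) in newset:
--                 helpset.add((m + null - elem) % m)
--                 check = False
--         newset.update(helpset)
--         if check: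
--             break
--     new = list(newset)
--     new.sort()
--     return new
-- ===== SOURCE B (Python) =====
-- def _close(S, frontier, m):
--     # semi-naive closure: only pair new elements against the current set
--     while frontier:
--         nxt = set()
--         for a in frontier:
--             for b in S:
--                 for r in ((a + b) % m, (a * b) % m):
--                     if r not in S:
--                         nxt.add(r)
--         S |= nxt
--         frontier = nxt
--     return S
--
--
-- def _has_one(S, m):
--     return any(all((e * v) % m == e for e in S) for v in S)
--
--
-- def buildsubring(init, m):
--     S = _close(set(init), set(init), m)
--     while True:
--         add = set()
--         if 0 not in S:
--             add.add(0)
--         if 1 not in S and not _has_one(S, m):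
--             add.add(1)
--         if add:
--             S = _close(S | add, add, m)
--             continue
--         inv = {(-e) % m for e in S} - S
--         if not inv:
--             return sorted(S)
--         S = _close(S | inv, inv, m)
-- ===== Notes on version B (the rewrite author's own statement) =====
-- stated objective: alternative
-- what changed: Replaces A's naive fixpoint (which rescans all pairs of the whole set every round and tracks progress by comparing the lengths of two shadow sets) with a semi-naive worklist closure that only combines newly added elements against the current set, tests for the zero element by direct membership of 0 and for a multiplicative identity by an any/all scan instead of A's sentinel-returning findnull/findone helpers, and merges the helpset copy of the inverse pass into one set difference.
-- outside the precondition, e.g. on buildsubring([], 1): A does not finish within the time limit, B returns [0, 1]; on buildsubring([2], -3): A does not finish within the time limit, B returns [-2, -1, 0, 1, 2]; on buildsubring([0], -5): A returns [0], B returns [0]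
import Mathlib
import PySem

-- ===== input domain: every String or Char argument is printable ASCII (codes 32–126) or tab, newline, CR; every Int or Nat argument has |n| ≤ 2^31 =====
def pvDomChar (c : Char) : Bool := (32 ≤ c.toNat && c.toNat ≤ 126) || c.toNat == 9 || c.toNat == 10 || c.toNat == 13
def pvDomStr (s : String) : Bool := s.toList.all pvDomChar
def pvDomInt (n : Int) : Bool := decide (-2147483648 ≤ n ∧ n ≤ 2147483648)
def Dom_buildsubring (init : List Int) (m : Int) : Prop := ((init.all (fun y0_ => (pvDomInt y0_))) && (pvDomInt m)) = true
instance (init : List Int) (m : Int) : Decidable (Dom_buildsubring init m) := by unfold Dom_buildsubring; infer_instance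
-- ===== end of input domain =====

-- B replaces A's naive rescan-everything fixpoint (progress tracked by comparing the lengths of two
-- shadow sets) with a semi-naive worklist closure combining only new elements against the set, and
-- direct zero/identity tests instead of A's sentinel-returning scans; same value on all of Pre_.
-- A's loops are ported with an explicit fuel parameter (the proof shows the fuel suffices on Pre_);
-- A's first-hit scans over Python sets are order-independent on Pre_ (the hit is unique), so the
-- port iterates the PySem.Set list.

-- ===== PORT A =====
def findnullGo (s : List Int) (m : Int) : List Int → Int
  | [] => -1
  | v :: rest =>
    if s.all (fun e => PySem.Int.mod (e + v) m == e) then v else findnullGo s m rest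

def findnull (s : PySem.Set Int) (m : Int) : Int := findnullGo s m s

def findoneGo (s : List Int) (m : Int) : List Int → Int
  | [] => -1
  | v :: rest =>
    if s.all (fun e => PySem.Int.mod (e * v) m == e) then v else findoneGo s m rest

def findone (s : PySem.Set Int) (m : Int) : Int := findoneGo s m s

-- for val1 in newset: for val2 in newset: oldset.add((val1+val2)%m); oldset.add((val1*val2)%m)
def aGrow (m : Int) (new old : PySem.Set Int) : PySem.Set Int :=
  new.foldl (fun o v1 =>
    new.foldl (fun o v2 =>
      PySem.Set.add (PySem.Set.add o (PySem.Int.mod (v1 + v2) m)) (PySem.Int.mod (v1 * v2) m)) o) old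

-- while len(oldset) != len(newset): newset.update(oldset); <double loop adding into oldset>
def aInner (m : Int) : Nat → PySem.Set Int → PySem.Set Int → PySem.Set Int × PySem.Set Int
  | 0, old, new => (old, new)
  | fuel+1, old, new =>
    if PySem.Set.len old == PySem.Set.len new then (old, new)
    else
      let new' := PySem.Set.update new old
      aInner m fuel (aGrow m new' old) new'

-- helpset = set(); helpset.update(newset); for elem in newset: if (m+null-elem)%m missing: add, check=False
def aHelp (m null : Int) (new : PySem.Set Int) : PySem.Set Int × Bool :=
  new.foldl (fun hc e =>
    if PySem.Set.contains new (PySem.Int.mod (m + null - e) m) then hc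
    else (PySem.Set.add hc.1 (PySem.Int.mod (m + null - e) m), false))
    (PySem.Set.update PySem.Set.empty new, true)

def aOuter (m : Int) (ifuel : Nat) : Nat → PySem.Set Int → PySem.Set Int → PySem.Set Int
  | 0, _, new => new
  | fuel+1, old, new =>
    let p := aInner m ifuel old new
    let null0 := findnull p.2 m
    let one0 := findone p.2 m
    let null1 := if null0 == -1 then 0 else null0
    let one1 := if one0 == -1 then 1 else one0
    let st2 : PySem.Set Int × Bool :=
      if PySem.Set.contains p.2 null1 then (p.2, true) else (PySem.Set.add p.2 null1, false)
    let st3 : PySem.Set Int × Bool :=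
      if PySem.Set.contains st2.1 one1 then st2 else (PySem.Set.add st2.1 one1, false)
    if st3.2 then
      let hp := aHelp m null1 st3.1
      let new4 := PySem.Set.update st3.1 hp.1
      if hp.2 then new4 else aOuter m ifuel fuel p.1 new4
    else aOuter m ifuel fuel p.1 st3.1

def buildsubring (init : List Int) (m : Int) : List Int :=
  let old0 := (PySem.List.pyRange 0 (init.length : Int) 1).foldl
      (fun s i => PySem.Set.add s (PySem.List.pyGetD init i 0)) PySem.Set.empty
  let fuel := init.length + m.natAbs + 2
  PySem.List.sorted (aOuter m fuel fuel old0 PySem.Set.empty) (fun x => x) false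

-- ===== PORT B =====
-- while frontier: nxt = {r for a in frontier for b in S for r in ((a+b)%m,(a*b)%m) if r not in S}; S |= nxt
-- nxt = {r for a in frontier for b in S for r in ((a+b)%m,(a*b)%m) if r not in S}
def bNxt (m : Int) (S F : PySem.Set Int) : PySem.Set Int :=
  F.foldl (fun acc a =>
    S.foldl (fun acc b =>
      let acc1 := if PySem.Set.contains S (PySem.Int.mod (a + b) m) then acc
                  else PySem.Set.add acc (PySem.Int.mod (a + b) m)
      if PySem.Set.contains S (PySem.Int.mod (a * b) m) then acc1
      else PySem.Set.add acc1 (PySem.Int.mod (a * b) m)) acc) PySem.Set.empty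

def bClose (m : Int) : Nat → PySem.Set Int → PySem.Set Int → PySem.Set Int
  | 0, S, _ => S
  | fuel+1, S, F =>
    if F.isEmpty then S
    else
      let nxt := bNxt m S F
      bClose m fuel (PySem.Set.union S nxt) nxt

def bHasOne (S : PySem.Set Int) (m : Int) : Bool :=
  S.any (fun v => S.all (fun e => PySem.Int.mod (e * v) m == e))

def bOuter (m : Int) (ifuel : Nat) : Nat → PySem.Set Int → PySem.Set Int
  | 0, S => S
  | fuel+1, S =>
    let add1 := if PySem.Set.contains S 0 then PySem.Set.empty else PySem.Set.add PySem.Set.empty 0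
    let add2 := if !PySem.Set.contains S 1 && !bHasOne S m then PySem.Set.add add1 1 else add1
    if !add2.isEmpty then bOuter m ifuel fuel (bClose m ifuel (PySem.Set.union S add2) add2)
    else
      let invAll := S.foldl (fun acc e => PySem.Set.add acc (PySem.Int.mod (-e) m)) PySem.Set.empty
      let inv := PySem.Set.diff invAll S
      if inv.isEmpty then S
      else bOuter m ifuel fuel (bClose m ifuel (PySem.Set.union S inv) inv)

def buildsubring_alt (init : List Int) (m : Int) : List Int :=
  let S0 := PySem.Set.ofList init
  let fuel := init.length + m.natAbs + 2
  PySem.List.sorted (bOuter m fuel fuel (bClose m fuel S0 S0)) (fun x => x) false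

-- ===== PRECONDITION & SPEC =====
-- Pre_ restricts to moduli m ≥ 2: for m = 0 Python's % raises ZeroDivisionError, and for m < 0 and
-- m = 1 A's inner loop compares the LENGTHS of its two shadow sets, which (since 1 % m ≠ 1 there)
-- usually never equalize, so A loops forever (e.g. on ([], 1) or ([2], -3)); A terminates for m < 2
-- only on scattered special inputs (1 ∈ init, or init already closed), which Pre_ also excludes.
def Pre_buildsubring (init : List Int) (m : Int) : Prop := 2 ≤ m
instance (init : List Int) (m : Int) : Decidable (Pre_buildsubring init m) := by
  unfold Pre_buildsubring; infer_instance

def pvWitness_buildsubring : List Int × Int := ([1, 5], 6)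

def Spec_buildsubring (init : List Int) (m : Int) (out : List Int) : Prop := out = buildsubring_alt init m
instance (init : List Int) (m : Int) (out : List Int) : Decidable (Spec_buildsubring init m out) := by
  unfold Spec_buildsubring; infer_instance

-- ===== CLAIM (what is proved, stated in full; the proofs are below) =====
def Claim_equal_buildsubring : Prop := ∀ (init : List Int) (m : Int), Dom_buildsubring init m → Pre_buildsubring init m → Spec_buildsubring init m (buildsubring init m)

-- ===== LEMMAS AND PROOFS =====

-- membership equality of two lists viewed as sets
def Eqs (s t : List Int) : Prop := ∀ x : Int, x ∈ s ↔ x ∈ t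

-- x is a one-step (+ or *) mod-m combination of two elements of s
def Ops (m : Int) (s : List Int) (x : Int) : Prop :=
  ∃ a ∈ s, ∃ b ∈ s, x = PySem.Int.mod (a + b) m ∨ x = PySem.Int.mod (a * b) m

-- one-step combinations with first element drawn from f
def OpsF (m : Int) (f s : List Int) (x : Int) : Prop :=
  ∃ a ∈ f, ∃ b ∈ s, x = PySem.Int.mod (a + b) m ∨ x = PySem.Int.mod (a * b) m

def ClosedS (m : Int) (s : List Int) : Prop := ∀ x, Ops m s x → x ∈ s

-- invariant tying A's inner-loop state (old,new) to B's worklist state (S,F)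
def InnerInv (m : Int) (U : Finset Int) (old new S F : List Int) : Prop :=
  old.Nodup ∧ new.Nodup ∧ S.Nodup ∧
  Eqs old S ∧ (∀ x : Int, x ∈ new ↔ (x ∈ S ∧ x ∉ F)) ∧ (∀ x ∈ F, x ∈ S) ∧
  (∀ x, Ops m new x → x ∈ old) ∧ (∀ x ∈ S, x ∈ U)

-- package of facts about aligned closure results
def Aligned (m : Int) (U : Finset Int) (old new T : List Int) : Prop :=
  Eqs old T ∧ Eqs new T ∧ old.Nodup ∧ new.Nodup ∧ T.Nodup ∧ (∀ x ∈ T, x ∈ U) ∧ ClosedS m T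


-- ----- generic list/set utilities -----

lemma eqs_length {s t : List Int} (hs : s.Nodup) (ht : t.Nodup) (h : ∀ x : Int, x ∈ s ↔ x ∈ t) :
    s.length = t.length :=
  ((List.perm_ext_iff_of_nodup hs ht).2 h).length_eq

lemma length_lt_of_ssub {s t : List Int} (hs : s.Nodup) (ht : t.Nodup)
    (hsub : ∀ x ∈ s, x ∈ t) {y : Int} (hy : y ∈ t) (hys : y ∉ s) : s.length < t.length := by
  have h1 : s.toFinset ⊂ t.toFinset := by
    constructor
    · intro x hx; simp only [List.mem_toFinset] at hx ⊢; exact hsub x hx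
    · intro hc; exact hys (by simpa using hc (by simpa using hy))
  calc s.length = s.toFinset.card := (List.toFinset_card_of_nodup hs).symm
    _ < t.toFinset.card := Finset.card_lt_card h1
    _ = t.length := List.toFinset_card_of_nodup ht

lemma length_le_card {s : List Int} {U : Finset Int} (hs : s.Nodup) (h : ∀ x ∈ s, x ∈ U) :
    s.length ≤ U.card :=
  calc s.length = s.toFinset.card := (List.toFinset_card_of_nodup hs).symm
    _ ≤ U.card := Finset.card_le_card (fun x hx => h x (by simpa using hx))

lemma set_foldl_nodup {β : Type} (step : PySem.Set Int → β → PySem.Set Int)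
    (hstep : ∀ s b, s.Nodup → (step s b).Nodup) :
    ∀ (l : List β) (s : PySem.Set Int), s.Nodup → (l.foldl step s).Nodup := by
  intro l
  induction l with
  | nil => intro s hs; simpa using hs
  | cons b t ih => intro s hs; simpa using ih _ (hstep s b hs)

lemma all_congr {s t : List Int} (h : Eqs s t) (p : Int → Bool) : s.all p = t.all p := by
  rw [← Bool.coe_iff_coe]
  simp only [List.all_eq_true]
  exact ⟨fun ha v hv => ha v ((h v).2 hv), fun ha v hv => ha v ((h v).1 hv)⟩

lemma Ops_congr {m : Int} {s t : List Int} (h : Eqs s t) (x : Int) : Ops m s x ↔ Ops m t x := by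
  constructor
  · rintro ⟨a, ha, b, hb, hx⟩; exact ⟨a, (h a).1 ha, b, (h b).1 hb, hx⟩
  · rintro ⟨a, ha, b, hb, hx⟩; exact ⟨a, (h a).2 ha, b, (h b).2 hb, hx⟩

-- ----- Int facts for m ≥ 2 -----

lemma mod_small {m x : Int} (hm : 2 ≤ m) (h1 : 0 ≤ x) (h2 : x < m) : PySem.Int.mod x m = x := by
  rw [PySem.Int.mod_eq_emod_of_pos (by omega)]; exact Int.emod_eq_of_lt h1 h2

lemma mod_one_eq {m : Int} (hm : 2 ≤ m) : PySem.Int.mod 1 m = 1 := mod_small hm (by omega) (by omega)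

lemma mod_zero_eq {m : Int} (hm : 2 ≤ m) : PySem.Int.mod 0 m = 0 := mod_small hm (by omega) (by omega)

lemma null_cand_zero {m v : Int} (hm : 2 ≤ m) (h : PySem.Int.mod (v + v) m = v) : v = 0 := by
  have hb1 := PySem.Int.mod_nonneg (v + v) (by omega : (0:Int) < m)
  have hb2 := PySem.Int.mod_lt (v + v) (by omega : (0:Int) < m)
  have he : PySem.Int.mod (v + v) m = (v + v) % m := PySem.Int.mod_eq_emod_of_pos (by omega)
  rw [he] at h hb1 hb2
  have hv : v % m = v := Int.emod_eq_of_lt (by omega) (by omega)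
  have hz : (v + v - v) % m = 0 := by rw [Int.sub_emod, h, hv]; simp
  have hd : m ∣ v := Int.dvd_of_emod_eq_zero (by simpa using hz)
  have := Int.emod_eq_zero_of_dvd hd
  omega

lemma mod_inv_eq {m e : Int} (hm : 2 ≤ m) (null : Int) (hnull : null = 0) :
    PySem.Int.mod (m + null - e) m = PySem.Int.mod (-e) m := by
  subst hnull
  rw [PySem.Int.mod_eq_emod_of_pos (by omega), PySem.Int.mod_eq_emod_of_pos (by omega)]
  have : m + 0 - e = -e + m * 1 := by ring
  rw [this, Int.add_mul_emod_self_left]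

-- ----- membership characterisations of the ports' folds -----

lemma mem_foldl_addadd (f g : Int → Int) :
    ∀ (l o : List Int) (x : Int),
      x ∈ l.foldl (fun o v => PySem.Set.add (PySem.Set.add o (f v)) (g v)) o ↔
        x ∈ o ∨ ∃ v ∈ l, x = f v ∨ x = g v := by
  intro l
  induction l with
  | nil => simp
  | cons v t ih =>
    intro o x
    simp only [List.foldl_cons, ih, PySem.Set.mem_add, List.mem_cons]
    constructor
    · rintro (((h|h)|h)|⟨w,hw,h⟩)
      · exact Or.inl h
      · exact Or.inr ⟨v, Or.inl rfl, Or.inl h⟩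
      · exact Or.inr ⟨v, Or.inl rfl, Or.inr h⟩
      · exact Or.inr ⟨w, Or.inr hw, h⟩
    · rintro (h|⟨w,(rfl|hw),h⟩)
      · exact Or.inl (Or.inl (Or.inl h))
      · rcases h with h|h
        · exact Or.inl (Or.inl (Or.inr h))
        · exact Or.inl (Or.inr h)
      · exact Or.inr ⟨w, hw, h⟩

lemma mem_aGrow (m : Int) (new : List Int) :
    ∀ (old : List Int) (x : Int), x ∈ aGrow m new old ↔ x ∈ old ∨ Ops m new x := by
  have h1 : ∀ (l old : List Int) (x : Int), (∀ v ∈ l, v ∈ new) →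
      (x ∈ l.foldl (fun o v1 =>
        new.foldl (fun o v2 =>
          PySem.Set.add (PySem.Set.add o (PySem.Int.mod (v1 + v2) m)) (PySem.Int.mod (v1 * v2) m)) o) old ↔
       x ∈ old ∨ ∃ a ∈ l, ∃ b ∈ new, x = PySem.Int.mod (a + b) m ∨ x = PySem.Int.mod (a * b) m) := by
    intro l
    induction l with
    | nil => simp
    | cons a t ih =>
      intro old x hsub
      simp only [List.foldl_cons]
      rw [ih _ _ (fun v hv => hsub v (List.mem_cons_of_mem _ hv)),
          mem_foldl_addadd (fun v2 => PySem.Int.mod (a + v2) m) (fun v2 => PySem.Int.mod (a * v2) m)]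
      constructor
      · rintro ((h|⟨b,hb,h⟩)|⟨w,hw,⟨b,hb,h⟩⟩)
        · exact Or.inl h
        · exact Or.inr ⟨a, List.mem_cons_self, b, hb, h⟩
        · exact Or.inr ⟨w, List.mem_cons_of_mem _ hw, b, hb, h⟩
      · rintro (h|⟨w,hw,b,hb,h⟩)
        · exact Or.inl (Or.inl h)
        · rcases List.mem_cons.1 hw with rfl|hw
          · exact Or.inl (Or.inr ⟨b, hb, h⟩)
          · exact Or.inr ⟨w, hw, b, hb, h⟩
  intro old x
  exact h1 new old x (fun v hv => hv)

lemma nodup_aGrow (m : Int) (new old : List Int) (h : old.Nodup) : (aGrow m new old).Nodup := by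
  unfold aGrow
  exact set_foldl_nodup _
    (fun s b hs => set_foldl_nodup _
      (fun s2 b2 hs2 => PySem.Set.nodup_add _ _ (PySem.Set.nodup_add _ _ hs2)) _ _ hs) _ _ h

lemma mem_bNxt_inner (m : Int) (S : List Int) (a : Int) :
    ∀ (l acc : List Int) (x : Int),
      x ∈ l.foldl (fun acc b =>
          let acc1 := if PySem.Set.contains S (PySem.Int.mod (a + b) m) then acc
                      else PySem.Set.add acc (PySem.Int.mod (a + b) m)
          if PySem.Set.contains S (PySem.Int.mod (a * b) m) then acc1
          else PySem.Set.add acc1 (PySem.Int.mod (a * b) m)) acc ↔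
        x ∈ acc ∨ ∃ b ∈ l, x ∉ S ∧ (x = PySem.Int.mod (a + b) m ∨ x = PySem.Int.mod (a * b) m) := by
  intro l
  induction l with
  | nil => simp
  | cons b t ih =>
    intro acc x
    simp only [List.foldl_cons, ih]
    constructor
    · rintro (h | ⟨c, hc, hx⟩)
      · -- x in the once-stepped acc
        by_cases h1 : PySem.Set.contains S (PySem.Int.mod (a + b) m) <;>
          by_cases h2 : PySem.Set.contains S (PySem.Int.mod (a * b) m) <;>
            simp only [h1, h2, if_pos, if_neg, Bool.not_eq_true, PySem.Set.mem_add] at h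
        · exact Or.inl h
        · rcases h with h|rfl
          · exact Or.inl h
          · exact Or.inr ⟨b, List.mem_cons_self, by simpa [PySem.Set.contains_iff] using h2, Or.inr rfl⟩
        · rcases h with h|rfl
          · exact Or.inl h
          · exact Or.inr ⟨b, List.mem_cons_self, by simpa [PySem.Set.contains_iff] using h1, Or.inl rfl⟩
        · rcases h with (h|rfl)|rfl
          · exact Or.inl h
          · exact Or.inr ⟨b, List.mem_cons_self, by simpa [PySem.Set.contains_iff] using h1, Or.inl rfl⟩
          · exact Or.inr ⟨b, List.mem_cons_self, by simpa [PySem.Set.contains_iff] using h2, Or.inr rfl⟩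
      · exact Or.inr ⟨c, List.mem_cons_of_mem _ hc, hx⟩
    · rintro (h | ⟨c, hc, hns, hx⟩)
      · left
        by_cases h1 : PySem.Set.contains S (PySem.Int.mod (a + b) m) <;>
          by_cases h2 : PySem.Set.contains S (PySem.Int.mod (a * b) m) <;>
            simp only [h1, h2, if_pos, if_neg, Bool.not_eq_true, PySem.Set.mem_add] <;> tauto
      · rcases List.mem_cons.1 hc with rfl|hc
        · left
          by_cases h1 : PySem.Set.contains S (PySem.Int.mod (a + c) m) <;>
            by_cases h2 : PySem.Set.contains S (PySem.Int.mod (a * c) m) <;>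
              simp only [h1, h2, if_pos, if_neg, Bool.not_eq_true, PySem.Set.mem_add] <;>
                rcases hx with rfl|rfl <;>
                  simp_all [PySem.Set.contains_iff] <;> tauto
        · exact Or.inr ⟨c, hc, hns, hx⟩

lemma mem_bNxt (m : Int) (S F : List Int) (x : Int) :
    x ∈ bNxt m S F ↔ x ∉ S ∧ OpsF m F S x := by
  unfold bNxt
  have h1 : ∀ (l acc : List Int),
      x ∈ l.foldl (fun acc a =>
        S.foldl (fun acc b =>
          let acc1 := if PySem.Set.contains S (PySem.Int.mod (a + b) m) then acc
                      else PySem.Set.add acc (PySem.Int.mod (a + b) m)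
          if PySem.Set.contains S (PySem.Int.mod (a * b) m) then acc1
          else PySem.Set.add acc1 (PySem.Int.mod (a * b) m)) acc) acc ↔
        x ∈ acc ∨ ∃ a ∈ l, x ∉ S ∧ ∃ b ∈ S, (x = PySem.Int.mod (a + b) m ∨ x = PySem.Int.mod (a * b) m) := by
    intro l
    induction l with
    | nil => simp
    | cons a t ih =>
      intro acc
      simp only [List.foldl_cons, ih, mem_bNxt_inner]
      constructor
      · rintro ((h|⟨b,hb,hns,hx⟩)|⟨c,hc,hns,hx⟩)
        · exact Or.inl h
        · exact Or.inr ⟨a, List.mem_cons_self, hns, b, hb, hx⟩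
        · exact Or.inr ⟨c, List.mem_cons_of_mem _ hc, hns, hx⟩
      · rintro (h|⟨c,hc,hns,b,hb,hx⟩)
        · exact Or.inl (Or.inl h)
        · rcases List.mem_cons.1 hc with rfl|hc
          · exact Or.inl (Or.inr ⟨b, hb, hns, hx⟩)
          · exact Or.inr ⟨c, hc, hns, b, hb, hx⟩
  rw [h1]
  unfold OpsF
  constructor
  · rintro (h|⟨a,ha,hns,b,hb,hx⟩)
    · simp at h
    · exact ⟨hns, a, ha, b, hb, hx⟩
  · rintro ⟨hns, a, ha, b, hb, hx⟩
    exact Or.inr ⟨a, ha, hns, b, hb, hx⟩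

lemma findnullGo_cases (s : List Int) (m : Int) :
    ∀ l, findnullGo s m l = -1 ∨
      (findnullGo s m l ∈ l ∧ (s.all (fun e => PySem.Int.mod (e + findnullGo s m l) m == e)) = true) := by
  intro l
  induction l with
  | nil => left; rfl
  | cons v t ih =>
    by_cases h : (s.all (fun e => PySem.Int.mod (e + v) m == e)) = true
    · right; simp [findnullGo, h]
    · rcases ih with h1|⟨h1,h2⟩
      · left; simpa [findnullGo, h] using h1
      · right; unfold findnullGo; simp only [h, if_neg, Bool.false_eq_true, if_false]
        exact ⟨List.mem_cons_of_mem _ h1, h2⟩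

lemma findoneGo_cases (s : List Int) (m : Int) :
    ∀ l, findoneGo s m l = -1 ∨
      (findoneGo s m l ∈ l ∧ (s.all (fun e => PySem.Int.mod (e * findoneGo s m l) m == e)) = true) := by
  intro l
  induction l with
  | nil => left; rfl
  | cons v t ih =>
    by_cases h : (s.all (fun e => PySem.Int.mod (e * v) m == e)) = true
    · right; simp [findoneGo, h]
    · rcases ih with h1|⟨h1,h2⟩
      · left; simpa [findoneGo, h] using h1
      · right; unfold findoneGo; simp only [h, if_neg, Bool.false_eq_true, if_false]
        exact ⟨List.mem_cons_of_mem _ h1, h2⟩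

lemma findoneGo_neg (s : List Int) (m : Int) :
    ∀ l, (∀ v ∈ l, ¬ (s.all (fun e => PySem.Int.mod (e * v) m == e)) = true) → findoneGo s m l = -1 := by
  intro l
  induction l with
  | nil => intro _; rfl
  | cons v t ih =>
    intro h
    unfold findoneGo
    simp only [h v List.mem_cons_self, if_neg, Bool.false_eq_true, if_false]
    exact ih (fun w hw => h w (List.mem_cons_of_mem _ hw))

lemma findoneGo_neg_witness (s : List Int) (m : Int) :
    ∀ l, (∀ v ∈ l, v ∈ s) → findoneGo s m l = -1 →
      ∀ v ∈ l, (s.all (fun e => PySem.Int.mod (e * v) m == e)) = true →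
        ((-1 : Int) ∈ s ∧ (s.all (fun e => PySem.Int.mod (e * (-1)) m == e)) = true) := by
  intro l
  induction l with
  | nil => intro _ _ v hv; simp at hv
  | cons w t ih =>
    intro hsub hneg v hv hall
    by_cases h : (s.all (fun e => PySem.Int.mod (e * w) m == e)) = true
    · have hw : w = -1 := by simpa [findoneGo, h] using hneg
      subst hw
      exact ⟨hsub _ List.mem_cons_self, h⟩
    · have hneg' : findoneGo s m t = -1 := by simpa [findoneGo, h] using hneg
      rcases List.mem_cons.1 hv with rfl|hv
      · exact absurd hall h
      · exact ih (fun z hz => hsub z (List.mem_cons_of_mem _ hz)) hneg' v hv hall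

lemma pred_neg_one_false {s : List Int} {m : Int} (hm : 2 ≤ m) (h : (-1 : Int) ∈ s) :
    ¬ (s.all (fun e => PySem.Int.mod (e * (-1)) m == e)) = true := by
  intro hall
  rw [List.all_eq_true] at hall
  have := hall (-1) h
  simp only [beq_iff_eq] at this
  have h1 : ((-1 : Int) * (-1)) = 1 := by ring
  rw [h1, mod_one_eq hm] at this
  omega

lemma aHelp_aux (m null : Int) (new : List Int) :
    ∀ (l : List Int) (hc : PySem.Set Int × Bool),
      (∀ x : Int, x ∈ (l.foldl (fun hc e =>
          if PySem.Set.contains new (PySem.Int.mod (m + null - e) m) then hc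
          else (PySem.Set.add hc.1 (PySem.Int.mod (m + null - e) m), false)) hc).1 ↔
        (x ∈ hc.1 ∨ ∃ e ∈ l, x = PySem.Int.mod (m + null - e) m ∧ PySem.Int.mod (m + null - e) m ∉ new)) ∧
      ((l.foldl (fun hc e =>
          if PySem.Set.contains new (PySem.Int.mod (m + null - e) m) then hc
          else (PySem.Set.add hc.1 (PySem.Int.mod (m + null - e) m), false)) hc).2 =
        (hc.2 && l.all (fun e => PySem.Set.contains new (PySem.Int.mod (m + null - e) m)))) ∧
      (hc.1.Nodup → (l.foldl (fun hc e =>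
          if PySem.Set.contains new (PySem.Int.mod (m + null - e) m) then hc
          else (PySem.Set.add hc.1 (PySem.Int.mod (m + null - e) m), false)) hc).1.Nodup) := by
  intro l
  induction l with
  | nil => intro hc; refine ⟨by simp, by simp, fun h => by simpa using h⟩
  | cons e t ih =>
    intro hc
    by_cases h : PySem.Set.contains new (PySem.Int.mod (m + null - e) m) = true
    · have hmem : PySem.Int.mod (m + null - e) m ∈ new := (PySem.Set.contains_iff _ _).1 h
      refine ⟨fun x => ?_, ?_, fun hnd => ?_⟩
      · simp only [List.foldl_cons, h, if_pos, (ih hc).1, List.mem_cons]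
        constructor
        · rintro (hx|⟨w,hw,hx⟩)
          · exact Or.inl hx
          · exact Or.inr ⟨w, Or.inr hw, hx⟩
        · rintro (hx|⟨w,(rfl|hw),hx⟩)
          · exact Or.inl hx
          · exact absurd hmem hx.2
          · exact Or.inr ⟨w, hw, hx⟩
      · simp only [List.foldl_cons, h, if_pos, List.all_cons, Bool.true_and]
        exact (ih hc).2.1
      · simp only [List.foldl_cons, h, if_pos]
        exact (ih hc).2.2 hnd
    · refine ⟨fun x => ?_, ?_, fun hnd => ?_⟩
      · simp only [List.foldl_cons, h, if_neg, Bool.false_eq_true, if_false,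
          (ih _).1, PySem.Set.mem_add, List.mem_cons]
        have hnm : PySem.Int.mod (m + null - e) m ∉ new := fun hx => h ((PySem.Set.contains_iff _ _).2 hx)
        constructor
        · rintro ((hx|rfl)|⟨w,hw,hx⟩)
          · exact Or.inl hx
          · exact Or.inr ⟨e, Or.inl rfl, rfl, hnm⟩
          · exact Or.inr ⟨w, Or.inr hw, hx⟩
        · rintro (hx|⟨w,(rfl|hw),hx⟩)
          · exact Or.inl (Or.inl hx)
          · exact Or.inl (Or.inr hx.1)
          · exact Or.inr ⟨w, hw, hx⟩
      · simp only [List.foldl_cons, h, if_neg, Bool.false_eq_true, if_false, List.all_cons]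
        rw [(ih _).2.1]
        simp [h]
      · simp only [List.foldl_cons, h, if_neg, Bool.false_eq_true, if_false]
        exact (ih _).2.2 (PySem.Set.nodup_add _ _ hnd)

lemma aHelp_spec (m null : Int) (new : List Int) (hn : new.Nodup) :
    (∀ x : Int, x ∈ (aHelp m null new).1 ↔
      (x ∈ new ∨ ∃ e ∈ new, x = PySem.Int.mod (m + null - e) m ∧ PySem.Int.mod (m + null - e) m ∉ new)) ∧
    ((aHelp m null new).2 = true ↔ ∀ e ∈ new, PySem.Int.mod (m + null - e) m ∈ new) ∧
    (aHelp m null new).1.Nodup := by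
  have h0 := aHelp_aux m null new new (PySem.Set.update PySem.Set.empty new, true)
  refine ⟨fun x => ?_, ?_, ?_⟩
  · rw [aHelp, h0.1]
    simp [PySem.Set.mem_update, PySem.Set.empty]
  · rw [aHelp, h0.2.1]
    simp [List.all_eq_true, PySem.Set.contains_iff]
  · exact h0.2.2 (PySem.Set.nodup_update _ _ (by simp [PySem.Set.empty]))


lemma length_le_of_sub {s t : List Int} (hs : s.Nodup) (ht : t.Nodup) (h : ∀ x ∈ s, x ∈ t) :
    s.length ≤ t.length :=
  calc s.length = s.toFinset.card := (List.toFinset_card_of_nodup hs).symm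
    _ ≤ t.toFinset.card := Finset.card_le_card (fun x hx => by
        simp only [List.mem_toFinset] at hx ⊢; exact h x hx)
    _ = t.length := List.toFinset_card_of_nodup ht

lemma contains_eq_false {s : List Int} {x : Int} (h : x ∉ s) : PySem.Set.contains s x = false := by
  by_cases hh : PySem.Set.contains s x = true
  · exact absurd ((PySem.Set.contains_iff _ _).1 hh) h
  · exact Bool.eq_false_iff.mpr hh

lemma findnull_val {m : Int} (hm : 2 ≤ m) (s : List Int) :
    (if findnull s m == -1 then 0 else findnull s m) = 0 := by
  rcases findnullGo_cases s m s with h | ⟨hmem, hall⟩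
  · rw [findnull, h]; simp
  · rw [List.all_eq_true] at hall
    have := hall _ hmem
    simp only [beq_iff_eq] at this
    have h0 : findnull s m = 0 := null_cand_zero hm this
    rw [findnull] at h0 ⊢
    rw [h0]
    simp

lemma findone_neg_iff {m : Int} (hm : 2 ≤ m) (s : List Int) :
    findone s m = -1 ↔ ∀ v ∈ s, ¬ (s.all (fun e => PySem.Int.mod (e * v) m == e)) = true := by
  constructor
  · intro h v hv hall
    have := findoneGo_neg_witness s m s (fun v hv => hv) h v hv hall
    exact pred_neg_one_false hm this.1 this.2
  · exact findoneGo_neg s m s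

lemma bHasOne_iff (S : List Int) (m : Int) :
    bHasOne S m = true ↔ ∃ v ∈ S, (S.all (fun e => PySem.Int.mod (e * v) m == e)) = true := by
  simp [bHasOne, List.any_eq_true]

lemma mem_invAll (m : Int) (S : List Int) (x : Int) :
    x ∈ S.foldl (fun acc e => PySem.Set.add acc (PySem.Int.mod (-e) m)) PySem.Set.empty ↔
      ∃ e ∈ S, x = PySem.Int.mod (-e) m := by
  rw [PySem.Set.mem_foldl_add]
  simp [PySem.Set.empty]

lemma nodup_invAll (m : Int) (S : List Int) :
    (S.foldl (fun acc e => PySem.Set.add acc (PySem.Int.mod (-e) m)) PySem.Set.empty).Nodup :=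
  set_foldl_nodup _ (fun s b hs => PySem.Set.nodup_add _ _ hs) _ _ (by simp [PySem.Set.empty])

lemma inner_bisim (m : Int) (U : Finset Int)
    (hUops : ∀ a b : Int, PySem.Int.mod (a + b) m ∈ U ∧ PySem.Int.mod (a * b) m ∈ U) :
    ∀ (fuel : Nat) (old new S F : List Int), InnerInv m U old new S F →
      U.card < fuel + new.length →
      Aligned m U (aInner m fuel old new).1 (aInner m fuel old new).2 (bClose m fuel S F) ∧
      (∀ x ∈ S, x ∈ bClose m fuel S F) := by
  intro fuel
  induction fuel with
  | zero =>
    intro old new S F hinv hfuel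
    obtain ⟨h1, h2, h3, h4, h5, h6, h7, h8⟩ := hinv
    have hsub : ∀ x ∈ new, x ∈ U := fun x hx => h8 x ((h5 x).1 hx).1
    have := length_le_card h2 hsub
    omega
  | succ fuel ih =>
    intro old new S F hinv hfuel
    obtain ⟨h1, h2, h3, h4, h5, h6, h7, h8⟩ := hinv
    by_cases hF : F = []
    · -- both loops exit: F is empty and the two shadow sets have equal length
      subst hF
      have hnewS : Eqs new S := fun x => by rw [h5 x]; simp
      have hlen : old.length = new.length :=
        eqs_length h1 h2 (fun x => (h4 x).trans (hnewS x).symm)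
      have hcond : (PySem.Set.len old == PySem.Set.len new) = true := by
        simp [PySem.Set.len, hlen]
      have hA : aInner m (fuel+1) old new = (old, new) := by
        simp only [aInner, hcond, if_pos]
      have hB : bClose m (fuel+1) S [] = S := by
        simp [bClose]
      rw [hA, hB]
      refine ⟨⟨h4, hnewS, h1, h2, h3, h8, ?_⟩, fun x hx => hx⟩
      intro x hx
      have : Ops m new x := (Ops_congr hnewS x).2 hx
      exact (h4 x).1 (h7 x this)
    · -- both loops run one more round
      obtain ⟨y, hyF⟩ := List.exists_mem_of_ne_nil _ hF
      have hyS : y ∈ S := h6 y hyF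
      have hynew : y ∉ new := fun hy => ((h5 y).1 hy).2 hyF
      have hsubno : ∀ x ∈ new, x ∈ old := fun x hx => (h4 x).2 ((h5 x).1 hx).1
      have hyold : y ∈ old := (h4 y).2 hyS
      have hlt : new.length < old.length := length_lt_of_ssub h2 h1 hsubno hyold hynew
      have hcond : ¬ ((PySem.Set.len old == PySem.Set.len new) = true) := by
        simp [PySem.Set.len]
        omega
      have hFe : F.isEmpty = false := by simpa [List.isEmpty_iff] using hF
      set new' := PySem.Set.update new old with hnew'
      set nxt := bNxt m S F with hnxt
      have hnew'S : Eqs new' S := by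
        intro x
        rw [hnew', PySem.Set.mem_update]
        constructor
        · rintro (hx|hx)
          · exact ((h5 x).1 hx).1
          · exact (h4 x).1 hx
        · intro hx; exact Or.inr ((h4 x).2 hx)
      have hnxt_notS : ∀ x ∈ nxt, x ∉ S := fun x hx => ((mem_bNxt m S F x).1 hx).1
      have hops_split : ∀ x, Ops m S x → x ∈ S ∨ x ∈ nxt := by
        rintro x ⟨a, ha, b, hb, hx⟩
        by_cases hxS : x ∈ S
        · exact Or.inl hxS
        · right
          rw [hnxt, mem_bNxt]
          refine ⟨hxS, ?_⟩
          by_cases haF : a ∈ F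
          · exact ⟨a, haF, b, hb, hx⟩
          · by_cases hbF : b ∈ F
            · refine ⟨b, hbF, a, ha, ?_⟩
              rcases hx with rfl|rfl
              · exact Or.inl (by rw [Int.add_comm])
              · exact Or.inr (by rw [Int.mul_comm])
            · exfalso
              have hanew : a ∈ new := (h5 a).2 ⟨ha, haF⟩
              have hbnew : b ∈ new := (h5 b).2 ⟨hb, hbF⟩
              exact hxS ((h4 x).1 (h7 x ⟨a, hanew, b, hbnew, hx⟩))
      have hinv' : InnerInv m U (aGrow m new' old) new' (PySem.Set.union S nxt) nxt := by
        refine ⟨nodup_aGrow m new' old h1, PySem.Set.nodup_update _ _ h2,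
          PySem.Set.nodup_union _ _ h3, ?_, ?_, ?_, ?_, ?_⟩
        · intro x
          rw [mem_aGrow, PySem.Set.mem_union]
          constructor
          · rintro (hx|hx)
            · exact Or.inl ((h4 x).1 hx)
            · exact hops_split x ((Ops_congr hnew'S x).1 hx)
          · rintro (hx|hx)
            · exact Or.inl ((h4 x).2 hx)
            · right
              refine (Ops_congr hnew'S x).2 ?_
              obtain ⟨hxns, a, ha, b, hb, hab⟩ := (mem_bNxt m S F x).1 hx
              exact ⟨a, h6 a ha, b, hb, hab⟩
        · intro x
          rw [PySem.Set.mem_union]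
          constructor
          · intro hx
            exact ⟨Or.inl ((hnew'S x).1 hx), fun hc => hnxt_notS x hc ((hnew'S x).1 hx)⟩
          · rintro ⟨hx|hx, hnx⟩
            · exact (hnew'S x).2 hx
            · exact absurd hx hnx
        · intro x hx; rw [PySem.Set.mem_union]; exact Or.inr hx
        · intro x hx; rw [mem_aGrow]; exact Or.inr hx
        · intro x hx
          rcases (PySem.Set.mem_union _ _ x).1 hx with hx|hx
          · exact h8 x hx
          · obtain ⟨-, a, -, b, -, hab⟩ := (mem_bNxt m S F x).1 hx
            rcases hab with rfl|rfl
            · exact (hUops a b).1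
            · exact (hUops a b).2
      have hSlen : S.length = old.length := eqs_length h3 h1 (fun x => (h4 x).symm)
      have hlen' : new'.length = S.length :=
        eqs_length (PySem.Set.nodup_update _ _ h2) h3 hnew'S
      have hfuel' : U.card < fuel + new'.length := by omega
      have hrec := ih (aGrow m new' old) new' (PySem.Set.union S nxt) nxt hinv' hfuel'
      have hA : aInner m (fuel+1) old new = aInner m fuel (aGrow m new' old) new' := by
        simp only [aInner, hcond, if_neg, Bool.false_eq_true, if_false]
        rw [← hnew']
      have hB : bClose m (fuel+1) S F = bClose m fuel (PySem.Set.union S nxt) nxt := by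
        simp only [bClose, hFe, Bool.false_eq_true, if_false]
        rw [← hnxt]
      rw [hA, hB]
      exact ⟨hrec.1, fun x hx => hrec.2 x ((PySem.Set.mem_union _ _ x).2 (Or.inl hx))⟩

lemma closure_entry (m : Int) (U : Finset Int)
    (hUops : ∀ a b : Int, PySem.Int.mod (a + b) m ∈ U ∧ PySem.Int.mod (a * b) m ∈ U) :
    ∀ (fuel : Nat) (old new S F : List Int),
      old.Nodup → new.Nodup → S.Nodup →
      Eqs new S → (∀ x : Int, x ∈ old ↔ (x ∈ S ∧ x ∉ F)) → (∀ x ∈ F, x ∈ S) → F ≠ [] →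
      (∀ x, Ops m old x → x ∈ old) → (∀ x ∈ F, Ops m S x) → (∀ x ∈ S, x ∈ U) →
      U.card < fuel →
      Aligned m U (aInner m fuel old new).1 (aInner m fuel old new).2 (bClose m fuel S F) ∧
      (∀ x ∈ S, x ∈ bClose m fuel S F) := by
  intro fuel old new S F h1 h2 h3 hx hold h6 hF hclosed habs h8 hfuel
  match fuel, hfuel with
  | fuel+1, hfuel =>
  obtain ⟨y, hyF⟩ := List.exists_mem_of_ne_nil _ hF
  have hyS : y ∈ S := h6 y hyF
  have hyold : y ∉ old := fun hy => ((hold y).1 hy).2 hyF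
  have hsubno : ∀ x ∈ old, x ∈ new := fun x hxo => (hx x).2 ((hold x).1 hxo).1
  have hynew : y ∈ new := (hx y).2 hyS
  have hlt : old.length < new.length := length_lt_of_ssub h1 h2 hsubno hynew hyold
  have hcond : ¬ ((PySem.Set.len old == PySem.Set.len new) = true) := by
    simp [PySem.Set.len]
    omega
  have hFe : F.isEmpty = false := by simpa [List.isEmpty_iff] using hF
  set new' := PySem.Set.update new old with hnew'
  set nxt := bNxt m S F with hnxt
  have hnew'S : Eqs new' S := by
    intro x
    rw [hnew', PySem.Set.mem_update]
    constructor
    · rintro (hxx|hxx)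
      · exact (hx x).1 hxx
      · exact ((hold x).1 hxx).1
    · intro hxx; exact Or.inl ((hx x).2 hxx)
  have hnxt_notS : ∀ x ∈ nxt, x ∉ S := fun x hxx => ((mem_bNxt m S F x).1 hxx).1
  have hops_split : ∀ x, Ops m S x → x ∈ S ∨ x ∈ nxt := by
    rintro x ⟨a, ha, b, hb, hab⟩
    by_cases hxS : x ∈ S
    · exact Or.inl hxS
    · right
      rw [hnxt, mem_bNxt]
      refine ⟨hxS, ?_⟩
      by_cases haF : a ∈ F
      · exact ⟨a, haF, b, hb, hab⟩
      · by_cases hbF : b ∈ F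
        · refine ⟨b, hbF, a, ha, ?_⟩
          rcases hab with rfl|rfl
          · exact Or.inl (by rw [Int.add_comm])
          · exact Or.inr (by rw [Int.mul_comm])
        · exfalso
          have haold : a ∈ old := (hold a).2 ⟨ha, haF⟩
          have hbold : b ∈ old := (hold b).2 ⟨hb, hbF⟩
          exact hxS (((hold x).1 (hclosed x ⟨a, haold, b, hbold, hab⟩)).1)
  have hinv' : InnerInv m U (aGrow m new' old) new' (PySem.Set.union S nxt) nxt := by
    refine ⟨nodup_aGrow m new' old h1, PySem.Set.nodup_update _ _ h2,
      PySem.Set.nodup_union _ _ h3, ?_, ?_, ?_, ?_, ?_⟩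
    · intro x
      rw [mem_aGrow, PySem.Set.mem_union]
      constructor
      · rintro (hxx|hxx)
        · exact Or.inl ((hold x).1 hxx).1
        · exact hops_split x ((Ops_congr hnew'S x).1 hxx)
      · rintro (hxx|hxx)
        · by_cases hxF : x ∈ F
          · right
            exact (Ops_congr hnew'S x).2 (habs x hxF)
          · exact Or.inl ((hold x).2 ⟨hxx, hxF⟩)
        · right
          refine (Ops_congr hnew'S x).2 ?_
          obtain ⟨hxns, a, ha, b, hb, hab⟩ := (mem_bNxt m S F x).1 hxx
          exact ⟨a, h6 a ha, b, hb, hab⟩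
    · intro x
      rw [PySem.Set.mem_union]
      constructor
      · intro hxx
        exact ⟨Or.inl ((hnew'S x).1 hxx), fun hc => hnxt_notS x hc ((hnew'S x).1 hxx)⟩
      · rintro ⟨hxx|hxx, hnx⟩
        · exact (hnew'S x).2 hxx
        · exact absurd hxx hnx
    · intro x hxx; rw [PySem.Set.mem_union]; exact Or.inr hxx
    · intro x hxx; rw [mem_aGrow]; exact Or.inr hxx
    · intro x hxx
      rcases (PySem.Set.mem_union _ _ x).1 hxx with hxx|hxx
      · exact h8 x hxx
      · obtain ⟨-, a, -, b, -, hab⟩ := (mem_bNxt m S F x).1 hxx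
        rcases hab with rfl|rfl
        · exact (hUops a b).1
        · exact (hUops a b).2
  have hSpos : 0 < S.length := List.length_pos_of_mem hyS
  have hlen' : new'.length = S.length :=
    eqs_length (PySem.Set.nodup_update _ _ h2) h3 hnew'S
  have hfuel' : U.card < fuel + new'.length := by omega
  have hrec := inner_bisim m U hUops fuel (aGrow m new' old) new' (PySem.Set.union S nxt) nxt hinv' hfuel'
  have hA : aInner m (fuel+1) old new = aInner m fuel (aGrow m new' old) new' := by
    simp only [aInner, hcond, if_neg, Bool.false_eq_true, if_false]
    rw [← hnew']
  have hB : bClose m (fuel+1) S F = bClose m fuel (PySem.Set.union S nxt) nxt := by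
    simp only [bClose, hFe, Bool.false_eq_true, if_false]
    rw [← hnxt]
  rw [hA, hB]
  exact ⟨hrec.1, fun x hxx => hrec.2 x ((PySem.Set.mem_union _ _ x).2 (Or.inl hxx))⟩

lemma outer_bisim (m : Int) (U : Finset Int) (hm : 2 ≤ m)
    (hUops : ∀ a b : Int, PySem.Int.mod (a + b) m ∈ U ∧ PySem.Int.mod (a * b) m ∈ U)
    (hUinv : ∀ a : Int, PySem.Int.mod a m ∈ U) (hU1 : (1 : Int) ∈ U)
    (ifuel : Nat) (hif : U.card < ifuel) :
    ∀ (fuel : Nat) (old new S F : List Int),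
      Aligned m U (aInner m ifuel old new).1 (aInner m ifuel old new).2 (bClose m ifuel S F) →
      U.card < fuel + (bClose m ifuel S F).length →
      Eqs (aOuter m ifuel fuel old new) (bOuter m ifuel fuel (bClose m ifuel S F)) ∧
      (aOuter m ifuel fuel old new).Nodup ∧ (bOuter m ifuel fuel (bClose m ifuel S F)).Nodup := by
  intro fuel
  induction fuel with
  | zero =>
    intro old new S F halign hfuel
    obtain ⟨-, -, -, -, hTnd, hTU, -⟩ := halign
    have := length_le_card hTnd hTU
    omega
  | succ fuel ih =>
    intro old new S F halign hfuel
    obtain ⟨hA1, hA2, hnd1, hnd2, hTnd, hTU, hTcl⟩ := halign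
    set p := aInner m ifuel old new with hp
    set T := bClose m ifuel S F with hT
    have hEqsTp : Eqs T p.2 := fun x => (hA2 x).symm
    -- the shared "continue" step: both sides add the same fresh elements E and re-close
    have contK : ∀ (EA E : List Int), Eqs EA (PySem.Set.union T E) → EA.Nodup → E.Nodup →
        (∀ x ∈ E, x ∉ T) → E ≠ [] → (∀ x ∈ E, Ops m (PySem.Set.union T E) x) → (∀ x ∈ E, x ∈ U) →
        Eqs (aOuter m ifuel fuel p.1 EA) (bOuter m ifuel fuel (bClose m ifuel (PySem.Set.union T E) E)) ∧
        (aOuter m ifuel fuel p.1 EA).Nodup ∧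
        (bOuter m ifuel fuel (bClose m ifuel (PySem.Set.union T E) E)).Nodup := by
      intro EA E hEqs hEAnd hEnd hEdisj hEne hEabs hEU
      have hold : ∀ x : Int, x ∈ p.1 ↔ (x ∈ PySem.Set.union T E ∧ x ∉ E) := by
        intro x
        constructor
        · intro hx
          have hxT : x ∈ T := (hA1 x).1 hx
          exact ⟨(PySem.Set.mem_union _ _ x).2 (Or.inl hxT), fun hxE => hEdisj x hxE hxT⟩
        · rintro ⟨hx, hnx⟩
          rcases (PySem.Set.mem_union _ _ x).1 hx with hx|hx
          · exact (hA1 x).2 hx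
          · exact absurd hx hnx
      have hclosed' : ∀ x, Ops m p.1 x → x ∈ p.1 :=
        fun x hx => (hA1 x).2 (hTcl x ((Ops_congr hA1 x).1 hx))
      have h8' : ∀ x ∈ PySem.Set.union T E, x ∈ U := by
        intro x hx
        rcases (PySem.Set.mem_union _ _ x).1 hx with hx|hx
        · exact hTU x hx
        · exact hEU x hx
      have hcall := closure_entry m U hUops ifuel p.1 EA (PySem.Set.union T E) E hnd1 hEAnd
        (PySem.Set.nodup_union _ _ hTnd) hEqs hold
        (fun x hx => (PySem.Set.mem_union _ _ x).2 (Or.inr hx)) hEne hclosed' hEabs h8' hif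
      obtain ⟨⟨hA1', hA2', hnd1', hnd2', hTnd', hTU', hTcl'⟩, hsub'⟩ := hcall
      have hElen : 0 < E.length := by
        cases E with
        | nil => exact absurd rfl hEne
        | cons a t => simp
      have hulen : (PySem.Set.union T E).length = T.length + E.length := by
        have := PySem.Set.update_eq_append_of_disjoint T E hEnd hEdisj
        rw [PySem.Set.union, this, List.length_append]
      have hle : (PySem.Set.union T E).length ≤ (bClose m ifuel (PySem.Set.union T E) E).length :=
        length_le_of_sub (PySem.Set.nodup_union _ _ hTnd) hTnd' hsub'
      have hfuel' : U.card < fuel + (bClose m ifuel (PySem.Set.union T E) E).length := by omega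
      exact ih p.1 EA (PySem.Set.union T E) E
        ⟨hA1', hA2', hnd1', hnd2', hTnd', hTU', hTcl'⟩ hfuel'
    -- the shared "inverse" step, reached when no zero/one element is missing (requires 0 ∈ T)
    have invCase : (0:Int) ∈ T →
        Eqs (if (aHelp m 0 p.2).2 then PySem.Set.update p.2 (aHelp m 0 p.2).1
             else aOuter m ifuel fuel p.1 (PySem.Set.update p.2 (aHelp m 0 p.2).1))
            (if (PySem.Set.diff (T.foldl (fun acc e => PySem.Set.add acc (PySem.Int.mod (-e) m)) PySem.Set.empty) T).isEmpty then T
             else bOuter m ifuel fuel (bClose m ifuel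
               (PySem.Set.union T (PySem.Set.diff (T.foldl (fun acc e => PySem.Set.add acc (PySem.Int.mod (-e) m)) PySem.Set.empty) T))
               (PySem.Set.diff (T.foldl (fun acc e => PySem.Set.add acc (PySem.Int.mod (-e) m)) PySem.Set.empty) T))) ∧
        (if (aHelp m 0 p.2).2 then PySem.Set.update p.2 (aHelp m 0 p.2).1
             else aOuter m ifuel fuel p.1 (PySem.Set.update p.2 (aHelp m 0 p.2).1)).Nodup ∧
        (if (PySem.Set.diff (T.foldl (fun acc e => PySem.Set.add acc (PySem.Int.mod (-e) m)) PySem.Set.empty) T).isEmpty then T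
             else bOuter m ifuel fuel (bClose m ifuel
               (PySem.Set.union T (PySem.Set.diff (T.foldl (fun acc e => PySem.Set.add acc (PySem.Int.mod (-e) m)) PySem.Set.empty) T))
               (PySem.Set.diff (T.foldl (fun acc e => PySem.Set.add acc (PySem.Int.mod (-e) m)) PySem.Set.empty) T))).Nodup := by
      intro h0
      obtain ⟨hHmem, hHflag, hHnd⟩ := aHelp_spec m 0 p.2 hnd2
      set invAll := T.foldl (fun acc e => PySem.Set.add acc (PySem.Int.mod (-e) m)) PySem.Set.empty with hIA
      set inv := PySem.Set.diff invAll T with hIv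
      have hmeminv : ∀ x : Int, x ∈ inv ↔ ((∃ e ∈ T, x = PySem.Int.mod (-e) m) ∧ x ∉ T) := by
        intro x
        rw [hIv, PySem.Set.mem_diff, hIA, mem_invAll]
      have hinvdisj : ∀ x ∈ inv, x ∉ T := fun x hx => ((hmeminv x).1 hx).2
      have hflageq : ((aHelp m 0 p.2).2 = true) ↔ (inv.isEmpty = true) := by
        rw [hHflag, List.isEmpty_iff, List.eq_nil_iff_forall_not_mem]
        constructor
        · intro hall x hx
          obtain ⟨⟨e, heT, rfl⟩, hnx⟩ := (hmeminv x).1 hx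
          have := hall e ((hA2 e).2 heT)
          rw [mod_inv_eq hm 0 rfl] at this
          exact hnx ((hA2 _).1 this)
        · intro hnone e he
          have heT : e ∈ T := (hA2 e).1 he
          by_contra hmiss
          have hmissT : PySem.Int.mod (m + 0 - e) m ∉ T := fun hc => hmiss ((hA2 _).2 hc)
          rw [mod_inv_eq hm 0 rfl] at hmissT
          exact hnone _ ((hmeminv _).2 ⟨⟨e, heT, rfl⟩, hmissT⟩)
      by_cases hbrk : inv.isEmpty = true
      · have hflag : (aHelp m 0 p.2).2 = true := hflageq.2 hbrk
        rw [if_pos hflag, if_pos hbrk]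
        have hinvnil : inv = [] := List.isEmpty_iff.1 hbrk
        refine ⟨fun x => ?_, PySem.Set.nodup_update _ _ hnd2, hTnd⟩
        rw [PySem.Set.mem_update]
        constructor
        · rintro (hx|hx)
          · exact (hA2 x).1 hx
          · rcases (hHmem x).1 hx with hx|⟨e, he, rfl, hmiss⟩
            · exact (hA2 x).1 hx
            · exfalso
              have heT : e ∈ T := (hA2 e).1 he
              have : PySem.Int.mod (m + 0 - e) m ∈ inv := by
                refine (hmeminv _).2 ⟨⟨e, heT, by rw [mod_inv_eq hm 0 rfl]⟩, ?_⟩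
                intro hc
                exact hmiss ((hA2 _).2 hc)
              rw [hinvnil] at this
              simp at this
        · intro hx
          exact Or.inl ((hA2 x).2 hx)
      · have hflag : (aHelp m 0 p.2).2 = false :=
          Bool.eq_false_iff.mpr (fun h => hbrk (hflageq.1 h))
        rw [if_neg hbrk]
        simp only [hflag, Bool.false_eq_true, if_false]
        apply contK
        · intro x
          rw [PySem.Set.mem_update, PySem.Set.mem_union]
          constructor
          · rintro (hx|hx)
            · exact Or.inl ((hA2 x).1 hx)
            · rcases (hHmem x).1 hx with hx|⟨e, he, rfl, hmiss⟩
              · exact Or.inl ((hA2 x).1 hx)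
              · by_cases hxT : PySem.Int.mod (m + 0 - e) m ∈ T
                · exact Or.inl hxT
                · right
                  refine (hmeminv _).2 ⟨⟨e, (hA2 e).1 he, by rw [mod_inv_eq hm 0 rfl]⟩, hxT⟩
          · rintro (hx|hx)
            · exact Or.inl ((hA2 x).2 hx)
            · right
              obtain ⟨⟨e, heT, rfl⟩, hnT⟩ := (hmeminv _).1 hx
              refine (hHmem _).2 (Or.inr ⟨e, (hA2 e).2 heT, ?_, ?_⟩)
              · rw [mod_inv_eq hm 0 rfl]
              · rw [mod_inv_eq hm 0 rfl]
                intro hc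
                exact hnT ((hA2 _).1 hc)
        · exact PySem.Set.nodup_update _ _ hnd2
        · exact PySem.Set.nodup_diff _ _ (nodup_invAll m T)
        · exact hinvdisj
        · intro hc
          rw [hc] at hbrk
          simp at hbrk
        · intro x hx
          obtain ⟨⟨e, heT, rfl⟩, hnT⟩ := (hmeminv _).1 hx
          have hb1 : 0 ≤ PySem.Int.mod (-e) m := PySem.Int.mod_nonneg _ (by omega)
          have hb2 : PySem.Int.mod (-e) m < m := PySem.Int.mod_lt _ (by omega)
          refine ⟨PySem.Int.mod (-e) m, (PySem.Set.mem_union _ _ _).2 (Or.inr hx), 0,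
            (PySem.Set.mem_union _ _ _).2 (Or.inl h0), Or.inl ?_⟩
          rw [Int.add_zero, mod_small hm hb1 hb2]
        · intro x hx
          obtain ⟨⟨e, heT, rfl⟩, -⟩ := (hmeminv _).1 hx
          exact hUinv _
    -- evaluate the null/one phase in both programs
    have hnullv : (if findnull p.2 m == -1 then 0 else findnull p.2 m) = 0 := findnull_val hm p.2
    by_cases hid : findone p.2 m = -1
    · have hnoid := (findone_neg_iff hm p.2).1 hid
      have hBone : bHasOne T m = false := by
        rw [← Bool.not_eq_true, bHasOne_iff]
        rintro ⟨v, hv, hall⟩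
        exact hnoid v ((hA2 v).2 hv) (by rw [all_congr hA2]; exact hall)
      have hidb : (findone p.2 m == -1) = true := by simp [hid]
      by_cases h0 : (0:Int) ∈ T
      · have hc0 : PySem.Set.contains p.2 0 = true := (PySem.Set.contains_iff _ _).2 ((hA2 0).2 h0)
        have hcT0 : PySem.Set.contains T 0 = true := (PySem.Set.contains_iff _ _).2 h0
        by_cases h1T : (1:Int) ∈ T
        · -- nothing missing: both fall through to the inverse phase
          have hc1 : PySem.Set.contains p.2 1 = true := (PySem.Set.contains_iff _ _).2 ((hA2 1).2 h1T)
          have hcT1 : PySem.Set.contains T 1 = true := (PySem.Set.contains_iff _ _).2 h1T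
          simp only [aOuter, bOuter, ← hp, ← hT, hnullv, hc0, hcT0, hc1, hcT1, hidb, hBone,
            if_pos, if_true, Bool.not_true, Bool.false_and, Bool.not_false, List.isEmpty_nil,
            Bool.not_eq_true, if_false]
          exact invCase h0
        · -- 1 is missing and there is no identity: both add 1 and re-close
          have hc1 : PySem.Set.contains p.2 1 = false :=
            contains_eq_false (fun hc => h1T ((hA2 1).1 hc))
          have hcT1 : PySem.Set.contains T 1 = false := contains_eq_false h1T
          have hBadd : PySem.Set.add PySem.Set.empty (1:Int) = [1] := rfl
          simp only [aOuter, bOuter, ← hp, ← hT, hnullv, hc0, hcT0, hc1, hcT1, hidb, hBone,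
            if_pos, if_true, Bool.not_true, Bool.false_eq_true, if_false, Bool.not_false,
            Bool.true_and, hBadd, List.nil_append, List.isEmpty_cons, Bool.not_true]
          apply contK
          · intro x
            rw [PySem.Set.mem_add, PySem.Set.mem_union]
            constructor
            · rintro (hx|rfl)
              · exact Or.inl ((hA2 x).1 hx)
              · exact Or.inr (by simp)
            · rintro (hx|hx)
              · exact Or.inl ((hA2 x).2 hx)
              · rw [List.mem_singleton] at hx
                subst hx
                exact Or.inr rfl
          · exact PySem.Set.nodup_add _ _ hnd2
          · simp
          · intro x hx
            rw [List.mem_singleton] at hx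
            subst hx
            exact h1T
          · simp
          · intro x hx
            rw [List.mem_singleton] at hx
            subst hx
            refine ⟨1, (PySem.Set.mem_union _ _ _).2 (Or.inr (by simp)), 1,
              (PySem.Set.mem_union _ _ _).2 (Or.inr (by simp)), Or.inr ?_⟩
            rw [show (1:Int) * 1 = 1 by ring, mod_one_eq hm]
          · intro x hx
            rw [List.mem_singleton] at hx
            subst hx
            exact hU1
      · -- 0 is missing
        have hc0 : PySem.Set.contains p.2 0 = false :=
          contains_eq_false (fun hc => h0 ((hA2 0).1 hc))
        have hcT0 : PySem.Set.contains T 0 = false := contains_eq_false h0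
        have hBadd0 : PySem.Set.add PySem.Set.empty (0:Int) = [0] := rfl
        by_cases h1T : (1:Int) ∈ T
        · -- only 0 missing (1 present): both add 0 and re-close
          have hc1 : PySem.Set.contains (PySem.Set.add p.2 0) 1 = true := by
            rw [PySem.Set.contains_iff, PySem.Set.mem_add]
            exact Or.inl ((hA2 1).2 h1T)
          have hcT1 : PySem.Set.contains T 1 = true := (PySem.Set.contains_iff _ _).2 h1T
          simp only [aOuter, bOuter, ← hp, ← hT, hnullv, hc0, hcT0, hc1, hcT1, hidb, hBone,
            Bool.false_eq_true, if_false, if_pos, if_true, Bool.not_true, Bool.false_and,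
            hBadd0, List.nil_append, List.isEmpty_cons, Bool.not_false]
          apply contK
          · intro x
            rw [PySem.Set.mem_add, PySem.Set.mem_union]
            constructor
            · rintro (hx|rfl)
              · exact Or.inl ((hA2 x).1 hx)
              · exact Or.inr (by simp)
            · rintro (hx|hx)
              · exact Or.inl ((hA2 x).2 hx)
              · rw [List.mem_singleton] at hx
                subst hx
                exact Or.inr rfl
          · exact PySem.Set.nodup_add _ _ hnd2
          · simp
          · intro x hx
            rw [List.mem_singleton] at hx
            subst hx
            exact h0
          · simp
          · intro x hx
            rw [List.mem_singleton] at hx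
            subst hx
            refine ⟨0, (PySem.Set.mem_union _ _ _).2 (Or.inr (by simp)), 0,
              (PySem.Set.mem_union _ _ _).2 (Or.inr (by simp)), Or.inl ?_⟩
            rw [show (0:Int) + 0 = 0 by ring, mod_zero_eq hm]
          · intro x hx
            rw [List.mem_singleton] at hx
            subst hx
            have := hUinv 0
            rwa [mod_zero_eq hm] at this
        · -- both 0 and 1 missing: both add {0,1} and re-close
          have hc1 : PySem.Set.contains (PySem.Set.add p.2 0) 1 = false := by
            refine contains_eq_false ?_
            rw [PySem.Set.mem_add]
            rintro (h|h)
            · exact h1T ((hA2 1).1 h)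
            · exact absurd h (by norm_num)
          have hcT1 : PySem.Set.contains T 1 = false := contains_eq_false h1T
          have hBadd01 : PySem.Set.add (PySem.Set.add PySem.Set.empty (0:Int)) (1:Int) = [0, 1] := rfl
          simp only [aOuter, bOuter, ← hp, ← hT, hnullv, hc0, hcT0, hc1, hcT1, hidb, hBone,
            Bool.false_eq_true, if_false, if_pos, if_true, Bool.not_false, Bool.true_and,
            hBadd01, List.nil_append, List.isEmpty_cons]
          apply contK
          · intro x
            rw [PySem.Set.mem_add, PySem.Set.mem_add, PySem.Set.mem_union]
            constructor
            · rintro ((hx|rfl)|rfl)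
              · exact Or.inl ((hA2 x).1 hx)
              · exact Or.inr (by simp)
              · exact Or.inr (by simp)
            · rintro (hx|hx)
              · exact Or.inl (Or.inl ((hA2 x).2 hx))
              · rcases List.mem_cons.1 hx with rfl|hx
                · exact Or.inl (Or.inr rfl)
                · rw [List.mem_singleton] at hx
                  subst hx
                  exact Or.inr rfl
          · exact PySem.Set.nodup_add _ _ (PySem.Set.nodup_add _ _ hnd2)
          · simp
          · intro x hx
            rcases List.mem_cons.1 hx with rfl|hx
            · exact h0
            · rw [List.mem_singleton] at hx
              subst hx
              exact h1T
          · simp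
          · intro x hx
            rcases List.mem_cons.1 hx with rfl|hx
            · refine ⟨0, (PySem.Set.mem_union _ _ _).2 (Or.inr (by simp)), 0,
                (PySem.Set.mem_union _ _ _).2 (Or.inr (by simp)), Or.inl ?_⟩
              rw [show (0:Int) + 0 = 0 by ring, mod_zero_eq hm]
            · rw [List.mem_singleton] at hx
              subst hx
              refine ⟨1, (PySem.Set.mem_union _ _ _).2 (Or.inr (by simp)), 1,
                (PySem.Set.mem_union _ _ _).2 (Or.inr (by simp)), Or.inr ?_⟩
              rw [show (1:Int) * 1 = 1 by ring, mod_one_eq hm]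
          · intro x hx
            rcases List.mem_cons.1 hx with rfl|hx
            · have := hUinv 0
              rwa [mod_zero_eq hm] at this
            · rw [List.mem_singleton] at hx
              subst hx
              exact hU1
    · -- an identity element exists: neither program adds 1
      obtain ⟨honemem, honeall⟩ := (findoneGo_cases p.2 m p.2).resolve_left hid
      have hBone : bHasOne T m = true := by
        rw [bHasOne_iff]
        exact ⟨findone p.2 m, (hA2 _).1 honemem, by rw [← all_congr hA2]; exact honeall⟩
      have hidb : (findone p.2 m == -1) = false := by
        simp [hid]
      by_cases h0 : (0:Int) ∈ T
      · -- nothing missing: both fall through to the inverse phase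
        have hc0 : PySem.Set.contains p.2 0 = true := (PySem.Set.contains_iff _ _).2 ((hA2 0).2 h0)
        have hcT0 : PySem.Set.contains T 0 = true := (PySem.Set.contains_iff _ _).2 h0
        have hcone : PySem.Set.contains p.2 (findone p.2 m) = true :=
          (PySem.Set.contains_iff _ _).2 honemem
        simp only [aOuter, bOuter, ← hp, ← hT, hnullv, hc0, hcT0, hcone, hidb, hBone,
          if_pos, if_true, Bool.not_true, Bool.and_false, Bool.false_eq_true, if_false,
          List.isEmpty_nil, Bool.not_false]
        exact invCase h0
      · -- only 0 missing: both add 0 and re-close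
        have hc0 : PySem.Set.contains p.2 0 = false :=
          contains_eq_false (fun hc => h0 ((hA2 0).1 hc))
        have hcT0 : PySem.Set.contains T 0 = false := contains_eq_false h0
        have hcone : PySem.Set.contains (PySem.Set.add p.2 0) (findone p.2 m) = true := by
          rw [PySem.Set.contains_iff, PySem.Set.mem_add]
          exact Or.inl honemem
        have hBadd0 : PySem.Set.add PySem.Set.empty (0:Int) = [0] := rfl
        simp only [aOuter, bOuter, ← hp, ← hT, hnullv, hc0, hcT0, hcone, hidb, hBone,
          Bool.false_eq_true, if_false, if_pos, if_true, Bool.not_true, Bool.and_false,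
          hBadd0, List.nil_append, List.isEmpty_cons, Bool.not_false]
        apply contK
        · intro x
          rw [PySem.Set.mem_add, PySem.Set.mem_union]
          constructor
          · rintro (hx|rfl)
            · exact Or.inl ((hA2 x).1 hx)
            · exact Or.inr (by simp)
          · rintro (hx|hx)
            · exact Or.inl ((hA2 x).2 hx)
            · rw [List.mem_singleton] at hx
              subst hx
              exact Or.inr rfl
        · exact PySem.Set.nodup_add _ _ hnd2
        · simp
        · intro x hx
          rw [List.mem_singleton] at hx
          subst hx
          exact h0
        · simp
        · intro x hx
          rw [List.mem_singleton] at hx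
          subst hx
          refine ⟨0, (PySem.Set.mem_union _ _ _).2 (Or.inr (by simp)), 0,
            (PySem.Set.mem_union _ _ _).2 (Or.inr (by simp)), Or.inl ?_⟩
          rw [show (0:Int) + 0 = 0 by ring, mod_zero_eq hm]
        · intro x hx
          rw [List.mem_singleton] at hx
          subst hx
          have := hUinv 0
          rwa [mod_zero_eq hm] at this

-- ===== VERDICT (by name: the statement is the Claim_ definition above) =====
lemma pairwise_lt_of_sorted_nodup (l : List Int) (hnd : l.Nodup) :
    (PySem.List.sorted l (fun x => x) false).Pairwise (fun a b => a < b) := by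
  have h1 := PySem.List.sorted_pairwise l (fun x => x)
  have h2 : (PySem.List.sorted l (fun x => x) false).Nodup :=
    (PySem.List.sorted_perm l (fun x => x) false).nodup_iff.2 hnd
  exact (h1.and h2).imp (fun h => lt_of_le_of_ne h.1 h.2)

theorem buildsubring_spec : Claim_equal_buildsubring := by
  intro init m hDom hPre
  have hm : 2 ≤ m := hPre
  show buildsubring init m = buildsubring_alt init m
  set U : Finset Int := init.toFinset ∪ Finset.Icc 0 (m - 1) with hU
  have hUinv : ∀ a : Int, PySem.Int.mod a m ∈ U := by
    intro a
    have h1 := PySem.Int.mod_nonneg a (by omega : (0:Int) < m)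
    have h2 := PySem.Int.mod_lt a (by omega : (0:Int) < m)
    rw [hU]
    exact Finset.mem_union_right _ (Finset.mem_Icc.2 ⟨h1, by omega⟩)
  have hUops : ∀ a b : Int, PySem.Int.mod (a + b) m ∈ U ∧ PySem.Int.mod (a * b) m ∈ U :=
    fun a b => ⟨hUinv _, hUinv _⟩
  have hU1 : (1 : Int) ∈ U := by
    rw [hU]
    exact Finset.mem_union_right _ (Finset.mem_Icc.2 ⟨by omega, by omega⟩)
  have hcard : U.card ≤ init.length + m.natAbs := by
    calc U.card ≤ init.toFinset.card + (Finset.Icc (0:Int) (m-1)).card := Finset.card_union_le _ _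
      _ ≤ init.length + m.natAbs := by
          have h1 := init.toFinset_card_le
          have h2 : (Finset.Icc (0:Int) (m-1)).card = (m - 1 + 1 - 0).toNat := Int.card_Icc _ _
          have h3 : (m - 1 + 1 - 0).toNat = m.natAbs := by omega
          omega
  set fuel := init.length + m.natAbs + 2 with hfuel
  have hif : U.card < fuel := by omega
  -- A's initial set built from range indexing is exactly set(init)
  have hold0 : (PySem.List.pyRange 0 (init.length : Int) 1).foldl
      (fun s i => PySem.Set.add s (PySem.List.pyGetD init i 0)) PySem.Set.empty =
      PySem.Set.ofList init := by
    rw [← PySem.Set.update_map_eq_foldl_add]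
    have : PySem.List.pyRange 0 (init.length : Int) 1 = PySem.List.pyRange 0 (PySem.List.len init) := rfl
    rw [this, PySem.List.map_pyGetD_pyRange_zero]
    rfl
  have hinv0 : InnerInv m U (PySem.Set.ofList init) [] (PySem.Set.ofList init) (PySem.Set.ofList init) := by
    refine ⟨PySem.Set.nodup_ofList init, by simp, PySem.Set.nodup_ofList init,
      fun x => Iff.rfl, fun x => ?_, fun x hx => hx, fun x hx => ?_, fun x hx => ?_⟩
    · simp only [List.not_mem_nil, false_iff]
      tauto
    · obtain ⟨a, ha, -⟩ := hx
      simp at ha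
    · rw [hU]
      exact Finset.mem_union_left _ (List.mem_toFinset.2 ((PySem.Set.mem_ofList init x).1 hx))
  have hstart := inner_bisim m U hUops fuel (PySem.Set.ofList init) [] (PySem.Set.ofList init)
    (PySem.Set.ofList init) hinv0 (by simpa using hif)
  have houter := outer_bisim m U hm hUops hUinv hU1 fuel hif fuel (PySem.Set.ofList init) []
    (PySem.Set.ofList init) (PySem.Set.ofList init) hstart.1 (by omega)
  obtain ⟨hEq, hAnd, hBnd⟩ := houter
  -- both final sets sort to the same list
  unfold buildsubring buildsubring_alt
  rw [hold0]
  refine PySem.List.sorted_eq_of_perm_of_pairwise_lt _ _ _ ?_ ?_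
  · exact ((PySem.List.sorted_perm _ _ false).trans
      ((List.perm_ext_iff_of_nodup hBnd hAnd).2 (fun x => (hEq x).symm)))
  · exact pairwise_lt_of_sorted_nodup _ hBnd
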